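-- pv_equiv track=rewrite | github.com/martix3001/pp1 | 13-Test3/PP3-test/p1.py | f
-- ===== SOURCE A (Python) =====
-- def f(n):
--     odp = ""
--     while n - 100 >= 0:
--         odp += "*"
--         n -= 100
--     while n - 10 >= 0:
--         odp += "+"
--         n -= 10
--     while n - 1 >= 0:
--         odp += "/"
--         n -= 1
--     return odp
-- ===== SOURCE B (Python) =====
-- def f(n):
--     if n <= 0:
--         return ""
--     a = n // 100
--     n -= a * 100
--     b = n // 10
--     n -= b * 10
--     return "*" * a + "+" * b + "/" * n
-- ===== Notes on version B (the rewrite author's own statement) =====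
-- stated objective: idiomatic
-- what changed: Replaced the three repeated-subtraction while loops with direct floor-division/remainder arithmetic and string repetition, after an explicit n <= 0 guard.
import Mathlib
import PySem

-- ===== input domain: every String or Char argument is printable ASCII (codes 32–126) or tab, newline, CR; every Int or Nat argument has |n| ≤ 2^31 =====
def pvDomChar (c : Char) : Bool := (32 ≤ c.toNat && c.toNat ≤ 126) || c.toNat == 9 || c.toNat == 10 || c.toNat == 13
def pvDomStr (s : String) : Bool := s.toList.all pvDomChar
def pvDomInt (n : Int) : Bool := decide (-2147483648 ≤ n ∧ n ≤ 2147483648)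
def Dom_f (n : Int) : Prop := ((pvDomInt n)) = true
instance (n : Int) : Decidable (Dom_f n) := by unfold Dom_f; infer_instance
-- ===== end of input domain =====

-- B replaces A's three repeated-subtraction while loops with floor-division arithmetic and
-- string repetition behind an n ≤ 0 guard (objective: idiomatic; same asymptotic cost).

-- ===== PORT A =====
-- while n - 100 >= 0: odp += "*"; n -= 100
def whileStar (odp : String) (n : Int) : String × Int :=
  if n - 100 ≥ 0 then whileStar (odp ++ "*") (n - 100) else (odp, n)
termination_by n.toNat
decreasing_by omega

-- while n - 10 >= 0: odp += "+"; n -= 10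
def whilePlus (odp : String) (n : Int) : String × Int :=
  if n - 10 ≥ 0 then whilePlus (odp ++ "+") (n - 10) else (odp, n)
termination_by n.toNat
decreasing_by omega

-- while n - 1 >= 0: odp += "/"; n -= 1
def whileSlash (odp : String) (n : Int) : String × Int :=
  if n - 1 ≥ 0 then whileSlash (odp ++ "/") (n - 1) else (odp, n)
termination_by n.toNat
decreasing_by omega

def f (n : Int) : String :=
  let p1 := whileStar "" n
  let p2 := whilePlus p1.1 p1.2
  (whileSlash p2.1 p2.2).1

-- ===== PORT B =====
-- "*" * a  for a ≥ 0 (guarded by n > 0 in f_alt; Python repeats a string a times)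
def strRep (c : Char) (a : Int) : String := String.ofList (List.replicate a.toNat c)

def f_alt (n : Int) : String :=
  if n ≤ 0 then ""
  else
    let a := PySem.Int.floordiv n 100
    let n1 := n - a * 100
    let b := PySem.Int.floordiv n1 10
    let n2 := n1 - b * 10
    strRep '*' a ++ strRep '+' b ++ strRep '/' n2

-- ===== PRECONDITION & SPEC =====
def Spec_f (n : Int) (out : String) : Prop := out = f_alt n
instance (n : Int) (out : String) : Decidable (Spec_f n out) := by unfold Spec_f; infer_instance

-- ===== CLAIM (what is proved, stated in full; the proofs are below) =====
def Claim_equal_f : Prop := ∀ (n : Int), Dom_f n → Spec_f n (f n)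

-- ===== LEMMAS AND PROOFS =====

theorem ofList_push (s : String) (c : Char) (l : List Char) :
    s ++ String.ofList [c] ++ String.ofList l = s ++ String.ofList (c :: l) := by
  rw [String.append_assoc]
  congr 1
  exact String.ofList_append.symm

theorem whileStar_eq (n : Nat) : ∀ (odp : String) (m : Int), 0 ≤ m → m.toNat ≤ n →
    whileStar odp m = (odp ++ String.ofList (List.replicate (m / 100).toNat '*'), m % 100) := by
  induction n with
  | zero =>
    intro odp m h0 hle
    rw [whileStar]
    have hm : m = 0 := by omega
    subst hm; simp
  | succ k ih =>
    intro odp m h0 hle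
    rw [whileStar]
    by_cases h : m - 100 ≥ 0
    · rw [if_pos h, ih (odp ++ "*") (m - 100) (by omega) (by omega)]
      have h1 : ((m - 100) / 100).toNat + 1 = (m / 100).toNat := by omega
      have h2 : (m - 100) % 100 = m % 100 := by omega
      rw [h2, ← h1, List.replicate_succ]
      have : (("*" : String)) = String.ofList ['*'] := rfl
      rw [this, ofList_push]
    · rw [if_neg h]
      have hd : (m / 100).toNat = 0 := by omega
      have hm : m % 100 = m := by omega
      simp [hd, hm]

theorem whilePlus_eq (n : Nat) : ∀ (odp : String) (m : Int), 0 ≤ m → m.toNat ≤ n →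
    whilePlus odp m = (odp ++ String.ofList (List.replicate (m / 10).toNat '+'), m % 10) := by
  induction n with
  | zero =>
    intro odp m h0 hle
    rw [whilePlus]
    have hm : m = 0 := by omega
    subst hm; simp
  | succ k ih =>
    intro odp m h0 hle
    rw [whilePlus]
    by_cases h : m - 10 ≥ 0
    · rw [if_pos h, ih (odp ++ "+") (m - 10) (by omega) (by omega)]
      have h1 : ((m - 10) / 10).toNat + 1 = (m / 10).toNat := by omega
      have h2 : (m - 10) % 10 = m % 10 := by omega
      rw [h2, ← h1, List.replicate_succ]
      have : (("+" : String)) = String.ofList ['+'] := rfl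
      rw [this, ofList_push]
    · rw [if_neg h]
      have hd : (m / 10).toNat = 0 := by omega
      have hm : m % 10 = m := by omega
      simp [hd, hm]

theorem whileSlash_eq (n : Nat) : ∀ (odp : String) (m : Int), 0 ≤ m → m.toNat ≤ n →
    whileSlash odp m = (odp ++ String.ofList (List.replicate m.toNat '/'), 0) := by
  induction n with
  | zero =>
    intro odp m h0 hle
    rw [whileSlash]
    have hm : m = 0 := by omega
    subst hm; simp
  | succ k ih =>
    intro odp m h0 hle
    rw [whileSlash]
    by_cases h : m - 1 ≥ 0
    · rw [if_pos h, ih (odp ++ "/") (m - 1) (by omega) (by omega)]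
      have h1 : (m - 1).toNat + 1 = m.toNat := by omega
      rw [← h1, List.replicate_succ]
      have : (("/" : String)) = String.ofList ['/'] := rfl
      rw [this, ofList_push]
    · rw [if_neg h]
      have hm : m.toNat = 0 := by omega
      simp [hm]
      omega

theorem whileStar_neg (odp : String) (m : Int) (h : m < 100) : whileStar odp m = (odp, m) := by
  rw [whileStar]; rw [if_neg (by omega)]

theorem whilePlus_neg (odp : String) (m : Int) (h : m < 10) : whilePlus odp m = (odp, m) := by
  rw [whilePlus]; rw [if_neg (by omega)]

theorem whileSlash_neg (odp : String) (m : Int) (h : m < 1) : whileSlash odp m = (odp, m) := by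
  rw [whileSlash]; rw [if_neg (by omega)]

-- ===== VERDICT (by name: the statement is the Claim_ definition above) =====
theorem f_spec : Claim_equal_f := by
  intro n _
  unfold Spec_f
  simp only [f, f_alt]
  by_cases hn : n ≤ 0
  · rw [if_pos hn, whileStar_neg "" n (by omega)]
    dsimp only
    rw [whilePlus_neg "" n (by omega)]
    dsimp only
    rw [whileSlash_neg "" n (by omega)]
  · rw [if_neg hn]
    have h0 : 0 ≤ n := by omega
    rw [whileStar_eq n.toNat "" n h0 (le_refl _)]
    dsimp only
    have hmod : 0 ≤ n % 100 ∧ n % 100 < 100 := ⟨Int.emod_nonneg n (by norm_num), Int.emod_lt_of_pos n (by norm_num)⟩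
    rw [whilePlus_eq (n % 100).toNat _ (n % 100) hmod.1 (le_refl _)]
    dsimp only
    have hmod2 : 0 ≤ n % 100 % 10 ∧ n % 100 % 10 < 10 :=
      ⟨Int.emod_nonneg _ (by norm_num), Int.emod_lt_of_pos _ (by norm_num)⟩
    rw [whileSlash_eq (n % 100 % 10).toNat _ _ hmod2.1 (le_refl _)]
    dsimp only
    have ha : PySem.Int.floordiv n 100 = n / 100 := PySem.Int.floordiv_eq_ediv_of_pos (by norm_num)
    have hn1 : n - n / 100 * 100 = n % 100 := by omega
    have hb : PySem.Int.floordiv (n % 100) 10 = n % 100 / 10 := PySem.Int.floordiv_eq_ediv_of_pos (by norm_num)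
    have hn2 : n % 100 - n % 100 / 10 * 10 = n % 100 % 10 := by omega
    simp only [ha, hn1, hb, hn2, strRep]
    simp [String.append_assoc]
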